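-- pv_equiv track=rewrite | github.com/BAH-HA/AdventOfCode25 | day_10/day10_p1.py | toggle_state_lights
-- ===== SOURCE A (Python) =====
-- def toggle_state_lights(current_state, button_indices):
--         """Applies button press to state and returns the new state tuple."""
--         # Convert tuple to list for mutable modification
--         new_lights = list(current_state)
--
--         for index in button_indices:
--             # Toggle: '.' -> '#' or '#' -> '.'
--             if new_lights[index] == '.':
--                 new_lights[index] = '#'
--             else:
--                 new_lights[index] = '.'
--
--         # Return as immutable tuple for hashing
--         return tuple(new_lights)
-- ===== SOURCE B (Python) =====
-- def press(light, times):
--     """State of one cell after being toggled `times` times."""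
--     if times == 0:
--         return light
--     # after at least one toggle the cell is '#' or '.', decided by parity
--     return '#' if (light == '.') == (times % 2 == 1) else '.'
--
--
-- def toggle_state_lights(current_state, button_indices):
--     """Applies button press to state and returns the new state tuple."""
--     presses = {}
--     for index in button_indices:
--         presses[index] = presses.get(index, 0) + 1
--     new_lights = list(current_state)
--     for index, times in presses.items():
--         new_lights[index] = press(new_lights[index], times)
--     return tuple(new_lights)
-- ===== Notes on version B (the rewrite author's own statement) =====
-- stated objective: alternative
-- what changed: B tabulates press counts per index in a dict and then applies each pressed cell's final state once via a closed-form parity helper, instead of A's one-toggle-per-press mutation loop; Pre_ excludes only inputs on which A raises IndexError (an out-of-range press index).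
import Mathlib
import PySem

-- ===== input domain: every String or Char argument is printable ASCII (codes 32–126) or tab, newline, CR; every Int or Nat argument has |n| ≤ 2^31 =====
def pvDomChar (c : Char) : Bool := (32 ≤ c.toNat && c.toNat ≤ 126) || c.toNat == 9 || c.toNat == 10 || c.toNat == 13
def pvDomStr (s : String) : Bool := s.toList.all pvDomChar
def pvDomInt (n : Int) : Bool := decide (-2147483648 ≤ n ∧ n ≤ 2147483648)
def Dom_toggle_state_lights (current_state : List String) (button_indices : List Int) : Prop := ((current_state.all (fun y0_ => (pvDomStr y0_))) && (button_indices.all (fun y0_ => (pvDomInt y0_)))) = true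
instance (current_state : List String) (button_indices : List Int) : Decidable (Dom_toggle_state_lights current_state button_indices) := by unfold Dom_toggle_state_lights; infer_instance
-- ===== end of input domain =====

-- B tabulates press counts per index in a dict, then applies each pressed cell's final
-- state once by parity, instead of A's one-toggle-per-press mutation loop (objective:
-- alternative; the equivalence is about the return value, A's tuple modelled as List String).


-- ===== PORT A =====
def toggle_state_lights (current_state : List String) (button_indices : List Int) : List String :=
  button_indices.foldl (fun new_lights index =>
    if PySem.List.pyGetD new_lights index "" == "." then
      PySem.List.pySetD new_lights index "#"
    else
      PySem.List.pySetD new_lights index ".") current_state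

-- ===== PORT B =====
-- helper press(light, times): state of one cell after `times` toggles
def pvPress (light : String) (times : Int) : String :=
  if times == 0 then light
  else if (light == ".") == (PySem.Int.mod times 2 == 1) then "#" else "."

def toggle_state_lights_alt (current_state : List String) (button_indices : List Int) : List String :=
  ((button_indices.foldl (fun d index => d.insert index (d.getD index 0 + 1))
      (PySem.Dict.empty : PySem.Dict Int Int)).items).foldl (fun new_lights p =>
    PySem.List.pySetD new_lights p.1 (pvPress (PySem.List.pyGetD new_lights p.1 "") p.2))
    current_state

-- ===== PRECONDITION & SPEC =====
-- Pre_ excludes exactly the inputs on which A raises (IndexError on an out-of-range press index).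
def Pre_toggle_state_lights (current_state : List String) (button_indices : List Int) : Prop :=
  ∀ i ∈ button_indices, -(current_state.length : Int) ≤ i ∧ i < current_state.length
instance (current_state : List String) (button_indices : List Int) : Decidable (Pre_toggle_state_lights current_state button_indices) := by unfold Pre_toggle_state_lights; infer_instance
def pvWitness_toggle_state_lights : List String × List Int := (["#", "."], [0, -1, 1])
def Spec_toggle_state_lights (current_state : List String) (button_indices : List Int) (out : List String) : Prop := out = toggle_state_lights_alt current_state button_indices
instance (current_state : List String) (button_indices : List Int) (out : List String) : Decidable (Spec_toggle_state_lights current_state button_indices out) := by unfold Spec_toggle_state_lights; infer_instance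

-- ===== CLAIM =====
def Claim_equal_toggle_state_lights : Prop := ∀ (current_state : List String) (button_indices : List Int), Dom_toggle_state_lights current_state button_indices → Pre_toggle_state_lights current_state button_indices → Spec_toggle_state_lights current_state button_indices (toggle_state_lights current_state button_indices)

-- ===== LEMMAS AND PROOFS =====

-- toggle of one cell
def pvToggle (v : String) : String := if v == "." then "#" else "."

-- value of a cell after c presses
def pvApply (c : Nat) (v : String) : String :=
  if c = 0 then v
  else if c % 2 = 1 then pvToggle v
  else (if v == "." then "." else "#")

-- canonical (nonnegative) position of press index i in a list of length n
def pvPos (n : Nat) (i : Int) : Nat := (PySem.Int.mod i n).toNat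

lemma pvMod_char (n : Nat) (i : Int) (h1 : -(n:Int) ≤ i) (h2 : i < n) :
    PySem.Int.mod i n = if 0 ≤ i then i else i + n := by
  have hn : (0:Int) ≤ n := by positivity
  simp only [PySem.Int.mod, Int.fmod_eq_emod]
  by_cases h0 : (0:Int) ≤ i
  · have : i % (n:Int) = i := Int.emod_eq_of_lt h0 h2
    simp [this, hn, h0]
  · have hpos : (0:Int) < n := by omega
    have hin : (i + (n:Int)) % n = i % n := by
      simpa using Int.add_mul_emod_self_left (a := i) (b := (n:Int)) (c := 1)
    have : i % (n:Int) = i + n := by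
      rw [← hin]; exact Int.emod_eq_of_lt (by omega) (by omega)
    simp [this, hn, h0]

lemma pvPos_lt (n : Nat) (i : Int) (h1 : -(n:Int) ≤ i) (h2 : i < n) : pvPos n i < n := by
  unfold pvPos; rw [pvMod_char n i h1 h2]; split_ifs <;> omega

lemma pvIdx_eq (n : Nat) (i : Int) (h1 : -(n:Int) ≤ i) (h2 : i < n) :
    PySem.List.pyIdx? n i = some (pvPos n i) := by
  unfold pvPos
  rw [pvMod_char n i h1 h2]
  simp only [PySem.List.pyIdx?]
  split_ifs <;> first | rfl | (congr 1; omega)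

lemma pvGetD_eq (xs : List String) (i : Int) (h1 : -(xs.length:Int) ≤ i) (h2 : i < xs.length) :
    PySem.List.pyGetD xs i "" = xs.getD (pvPos xs.length i) "" := by
  have hj := pvPos_lt xs.length i h1 h2
  simp [PySem.List.pyGetD, PySem.List.pyGet?, pvIdx_eq xs.length i h1 h2,
        List.getD, List.getElem?_eq_getElem hj]

lemma pvSetD_eq (xs : List String) (i : Int) (v : String)
    (h1 : -(xs.length:Int) ≤ i) (h2 : i < xs.length) :
    PySem.List.pySetD xs i v = xs.set (pvPos xs.length i) v := by
  simp [PySem.List.pySetD, PySem.List.pySet?, pvIdx_eq xs.length i h1 h2]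

lemma pvStep_eq (xs : List String) (i : Int) (h1 : -(xs.length:Int) ≤ i) (h2 : i < xs.length) :
    (if PySem.List.pyGetD xs i "" == "." then PySem.List.pySetD xs i "#"
     else PySem.List.pySetD xs i ".")
      = xs.set (pvPos xs.length i) (pvToggle (xs.getD (pvPos xs.length i) "")) := by
  rw [pvGetD_eq xs i h1 h2, pvSetD_eq xs i "#" h1 h2, pvSetD_eq xs i "." h1 h2]
  unfold pvToggle
  split_ifs <;> simp_all

lemma pvApply_succ (c : Nat) (v : String) : pvApply (c+1) v = pvApply c (pvToggle v) := by
  unfold pvApply pvToggle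
  rcases c with _ | c
  · simp
  · by_cases hv : v == "." <;> split_ifs <;> simp_all <;> omega

lemma pvApply_eq_iter (c : Nat) (v : String) : pvApply c v = pvToggle^[c] v := by
  induction c generalizing v with
  | zero => simp [pvApply]
  | succ c ih => rw [pvApply_succ, Function.iterate_succ_apply, ih]

lemma pvApply_add (a b : Nat) (v : String) : pvApply a (pvApply b v) = pvApply (b + a) v := by
  simp [pvApply_eq_iter, ← Function.iterate_add_apply, Nat.add_comm]

-- characterization of A's fold
lemma pvFoldA_char (idxs : List Int) (lights : List String)
    (h : ∀ i ∈ idxs, -(lights.length:Int) ≤ i ∧ i < lights.length) :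
    idxs.foldl (fun new_lights index =>
        if PySem.List.pyGetD new_lights index "" == "." then
          PySem.List.pySetD new_lights index "#"
        else
          PySem.List.pySetD new_lights index ".") lights
      = lights.mapIdx (fun j v => pvApply ((idxs.map (pvPos lights.length)).count j) v) := by
  induction idxs generalizing lights with
  | nil =>
    apply List.ext_getElem (by simp)
    intro k h1 h2
    simp [List.getElem_mapIdx, pvApply]
  | cons i rest ih =>
    obtain ⟨h1, h2⟩ := h i (by simp)
    have hrest : ∀ j ∈ rest, -(lights.length:Int) ≤ j ∧ j < lights.length := fun j hj => h j (by simp [hj])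
    have hj := pvPos_lt lights.length i h1 h2
    simp only [List.foldl_cons, pvStep_eq lights i h1 h2]
    set lights' := lights.set (pvPos lights.length i) (pvToggle (lights.getD (pvPos lights.length i) "")) with hl'
    have hlen : lights'.length = lights.length := by simp [hl']
    rw [ih lights' (by rw [hlen]; exact hrest), hlen]
    apply List.ext_getElem (by simp [hlen])
    intro k hk hk'
    have hklt : k < lights.length := by simpa [hlen] using hk'
    simp only [List.getElem_mapIdx]
    by_cases hke : k = pvPos lights.length i
    · subst hke
      have : lights'[pvPos lights.length i] = pvToggle (lights.getD (pvPos lights.length i) "") := by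
        simp [hl', List.getElem_set_self]
      rw [this]
      have hgd : lights.getD (pvPos lights.length i) "" = lights[pvPos lights.length i] := by
        simp [List.getD, List.getElem?_eq_getElem hklt]
      rw [hgd]
      have hcnt : ((i :: rest).map (pvPos lights.length)).count (pvPos lights.length i)
          = (rest.map (pvPos lights.length)).count (pvPos lights.length i) + 1 := by
        simp
      rw [hcnt, pvApply_succ]
    · have : lights'[k] = lights[k] := by
        simp [hl', List.getElem_set_ne (by omega : ¬ pvPos lights.length i = k)]
      rw [this]
      have hcnt : ((i :: rest).map (pvPos lights.length)).count k
          = (rest.map (pvPos lights.length)).count k := by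
        simp [Ne.symm hke]
      rw [hcnt]

-- pvPress on a positive natural count is pvApply
lemma pvPress_eq (v : String) (m : Nat) (hm : 1 ≤ m) : pvPress v (m : Int) = pvApply m v := by
  have hne : ((m : Int) == 0) = false := by simp; omega
  have hmod : PySem.Int.mod (m : Int) 2 = ((m % 2 : Nat) : Int) := by
    have : ((2:Nat):Int) = (2:Int) := rfl
    rw [← this, PySem.Int.mod_natCast]
  unfold pvPress pvApply pvToggle
  rw [hne, hmod]
  by_cases hp : m % 2 = 1
  · by_cases hv : v == "." <;> simp_all <;> omega
  · by_cases hv : v == "." <;> simp_all <;> omega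

-- press-count at cell j contributed by a list of (key, count) pairs
def pvSumAt (n : Nat) (ps : List (Int × Int)) (j : Nat) : Nat :=
  (ps.map (fun p => if pvPos n p.1 = j then p.2.toNat else 0)).sum

-- characterization of B's second loop over arbitrary (key, count) pairs
lemma pvFoldB_char (ps : List (Int × Int)) (lights : List String)
    (h : ∀ p ∈ ps, (-(lights.length:Int) ≤ p.1 ∧ p.1 < lights.length) ∧ 1 ≤ p.2) :
    ps.foldl (fun new_lights p =>
        PySem.List.pySetD new_lights p.1 (pvPress (PySem.List.pyGetD new_lights p.1 "") p.2))
      lights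
      = lights.mapIdx (fun j v => pvApply (pvSumAt lights.length ps j) v) := by
  induction ps generalizing lights with
  | nil =>
    apply List.ext_getElem (by simp)
    intro k h1 h2
    simp [List.getElem_mapIdx, pvSumAt, pvApply]
  | cons p rest ih =>
    obtain ⟨⟨h1, h2⟩, h3⟩ := h p (by simp)
    have hrest : ∀ q ∈ rest, (-(lights.length:Int) ≤ q.1 ∧ q.1 < lights.length) ∧ 1 ≤ q.2 :=
      fun q hq => h q (by simp [hq])
    have hj := pvPos_lt lights.length p.1 h1 h2
    obtain ⟨m, hm, hmp⟩ : ∃ m : Nat, 1 ≤ m ∧ p.2 = (m : Int) :=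
      ⟨p.2.toNat, by omega, by omega⟩
    have hstep : PySem.List.pySetD lights p.1 (pvPress (PySem.List.pyGetD lights p.1 "") p.2)
        = lights.set (pvPos lights.length p.1) (pvApply m (lights.getD (pvPos lights.length p.1) "")) := by
      rw [pvGetD_eq lights p.1 h1 h2, pvSetD_eq lights p.1 _ h1 h2, hmp, pvPress_eq _ m hm]
    simp only [List.foldl_cons, hstep]
    set lights' := lights.set (pvPos lights.length p.1) (pvApply m (lights.getD (pvPos lights.length p.1) "")) with hl'
    have hlen : lights'.length = lights.length := by simp [hl']
    rw [ih lights' (by rw [hlen]; exact hrest), hlen]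
    apply List.ext_getElem (by simp [hlen])
    intro k hk hk'
    have hklt : k < lights.length := by simpa [hlen] using hk'
    simp only [List.getElem_mapIdx]
    by_cases hke : k = pvPos lights.length p.1
    · subst hke
      have hv : lights'[pvPos lights.length p.1]
          = pvApply m (lights.getD (pvPos lights.length p.1) "") := by
        simp [hl', List.getElem_set_self]
      rw [hv]
      have hgd : lights.getD (pvPos lights.length p.1) "" = lights[pvPos lights.length p.1] := by
        simp [List.getD, List.getElem?_eq_getElem hklt]
      rw [hgd, pvApply_add]
      have hsum : pvSumAt lights.length (p :: rest) (pvPos lights.length p.1)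
          = m + pvSumAt lights.length rest (pvPos lights.length p.1) := by
        simp [pvSumAt, hmp]
      rw [hsum, Nat.add_comm]
    · have hv : lights'[k] = lights[k] := by
        simp [hl', List.getElem_set_ne (by omega : ¬ pvPos lights.length p.1 = k)]
      rw [hv]
      have hsum : pvSumAt lights.length (p :: rest) k = pvSumAt lights.length rest k := by
        simp [pvSumAt, Ne.symm hke]
      rw [hsum]

-- sum of a map distributes over pointwise addition
lemma pvSum_map_add (S : List Int) (f g : Int → Nat) :
    (S.map (fun k => f k + g k)).sum = (S.map f).sum + (S.map g).sum := by
  induction S with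
  | nil => simp
  | cons y ys ih => simp [ih]; omega

-- a sum picking out one key of a Nodup list
lemma pvSum_single (S : List Int) (i : Int) (f : Int → Nat)
    (hnd : S.Nodup) (hi : i ∈ S) :
    (S.map (fun k => if k = i then f k else 0)).sum = f i := by
  induction S with
  | nil => simp at hi
  | cons y ys ih =>
    have hnd' := List.nodup_cons.1 hnd
    by_cases hyi : y = i
    · subst hyi
      have hz : (ys.map (fun k => if k = y then f k else 0)).sum = 0 := by
        apply List.sum_eq_zero
        intro x hx
        obtain ⟨k, hk, hkx⟩ := List.mem_map.1 hx
        have hky : k ≠ y := fun h => hnd'.1 (h ▸ hk)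
        simp [hky] at hkx
        omega
      simp [hz]
    · have hy : i ∈ ys := by
        rcases List.mem_cons.1 hi with h | h
        · exact absurd h.symm hyi
        · exact h
      simp [hyi, ih hnd'.2 hy]

-- grouping: summing each distinct key's multiplicity recovers the plain count
lemma pvCountP_eq_sum (bi : List Int) (S : List Int) (q : Int → Bool)
    (hmem : ∀ x ∈ bi, x ∈ S) (hnd : S.Nodup) :
    (S.map (fun k => if q k then bi.count k else 0)).sum = bi.countP q := by
  induction bi with
  | nil => simp
  | cons i rest ih =>
    have hiS : i ∈ S := hmem i (by simp)
    have hptw : S.map (fun k => if q k then (i :: rest).count k else 0)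
        = S.map (fun k =>
            (if q k then rest.count k else 0) + (if k = i then (if q k then 1 else 0) else 0)) := by
      apply List.map_congr_left
      intro k _
      rw [List.count_cons]
      by_cases h1 : q k <;> by_cases h2 : k = i <;>
        simp [h1, h2] <;> first | omega | (split_ifs <;> omega)
    rw [hptw, pvSum_map_add,
        ih (fun x hx => hmem x (by simp [hx])),
        pvSum_single S i (fun k => if q k then 1 else 0) hnd hiS,
        List.countP_cons]

lemma pvSum_counts (n : Nat) (bi : List Int) (j : Nat) :
    pvSumAt n ((PySem.Set.ofList bi).map (fun k => (k, (bi.count k : Int)))) j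
      = (bi.map (pvPos n)).count j := by
  unfold pvSumAt
  rw [List.map_map]
  have hptw : ((PySem.Set.ofList bi).map
        ((fun p : Int × Int => if pvPos n p.1 = j then p.2.toNat else 0) ∘
          (fun k => (k, (bi.count k : Int)))))
      = (PySem.Set.ofList bi).map
          (fun k => if (fun k => decide (pvPos n k = j)) k then bi.count k else 0) := by
    apply List.map_congr_left
    intro k _
    by_cases h : pvPos n k = j <;> simp [h]
  rw [hptw, pvCountP_eq_sum bi _ _
        (fun x hx => (PySem.Set.mem_ofList bi x).2 hx) (PySem.Set.nodup_ofList bi)]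
  rw [List.count_eq_countP, List.countP_map]
  apply List.countP_congr
  intro x _
  by_cases h : pvPos n x = j
  · simp [Function.comp, h]
  · simp [Function.comp, h]

-- ===== VERDICT (by name: the statement is the Claim_ definition above) =====
theorem toggle_state_lights_spec : Claim_equal_toggle_state_lights := by
  intro current_state button_indices _ hpre
  unfold Spec_toggle_state_lights toggle_state_lights toggle_state_lights_alt
  rw [pvFoldA_char button_indices current_state hpre]
  rw [PySem.Dict.foldl_insert_getD_add_one_eq_counter button_indices]
  rw [PySem.Dict.items_counter]
  rw [pvFoldB_char _ current_state (by
    intro p hp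
    obtain ⟨k, hk, rfl⟩ := List.mem_map.1 hp
    have hkbi : k ∈ button_indices := (PySem.Set.mem_ofList button_indices k).1 hk
    refine ⟨hpre k hkbi, ?_⟩
    have : 0 < button_indices.count k := List.count_pos_iff.2 hkbi
    simp
    omega)]
  congr 1
  funext j v
  rw [pvSum_counts]
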